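-- pv_equiv track=rewrite | github.com/twaitschulies/sentraAI-entrance-02 | app/models/network.py | _remove_interface_config
-- ===== SOURCE A (Python) =====
-- def _remove_interface_config(config_content: str, interface_name: str) -> str:
--     """Remove existing configuration for an interface."""
--     lines = config_content.split('\n')
--     new_lines = []
--     skip_section = False
--
--     for line in lines:
--         stripped = line.strip()
--
--         # Check if this is the start of our interface section
--         if stripped == f"interface {interface_name}":
--             skip_section = True
--             continue
--
--         # Check if this is the start of another interface section
--         elif stripped.startswith("interface ") and skip_section:
--             skip_section = False
--             new_lines.append(line)
--
--         # Skip lines in our interface section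
--         elif skip_section:
--             continue
--
--         # Keep all other lines
--         else:
--             new_lines.append(line)
--
--     return '\n'.join(new_lines)
-- ===== SOURCE B (Python) =====
-- def _remove_interface_config(config_content: str, interface_name: str) -> str:
--     """Remove existing configuration for an interface (group-partition version)."""
--     groups = [[]]
--     for line in config_content.split('\n'):
--         if line.strip().startswith('interface '):
--             groups.append([line])
--         else:
--             groups[-1].append(line)
--     header = f"interface {interface_name}"
--     kept = [g for g in groups if not (g and g[0].strip() == header)]
--     return '\n'.join(line for g in kept for line in g)
-- ===== Notes on version B (the rewrite author's own statement) =====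
-- stated objective: alternative
-- what changed: Replaces A's stateful skip-flag scan with a partition of the lines into header-delimited groups followed by a filter that drops groups whose header equals the target, then a flatten-and-join.
import Mathlib
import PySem

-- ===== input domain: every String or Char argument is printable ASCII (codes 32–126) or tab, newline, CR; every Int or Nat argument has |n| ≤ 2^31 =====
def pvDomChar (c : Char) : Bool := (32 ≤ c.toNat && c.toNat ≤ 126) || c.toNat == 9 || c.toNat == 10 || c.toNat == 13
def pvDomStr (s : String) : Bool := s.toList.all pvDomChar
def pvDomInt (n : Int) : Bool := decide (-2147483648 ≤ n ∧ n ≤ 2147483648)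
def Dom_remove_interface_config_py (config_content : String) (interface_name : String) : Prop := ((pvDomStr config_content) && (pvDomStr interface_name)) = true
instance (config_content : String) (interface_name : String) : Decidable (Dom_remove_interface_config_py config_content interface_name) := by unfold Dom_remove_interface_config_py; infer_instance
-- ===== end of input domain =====

-- B partitions the lines into header-delimited groups and filters out the groups whose
-- header equals "interface {name}", instead of A's skip-flag scan; same O(n) cost.

-- ===== PORT A =====
-- one iteration of A's for-loop: state = (new_lines, skip_section)
def pvStepA (interface_name : String) (st : List String × Bool) (line : String) :
    List String × Bool :=
  let stripped := PySem.Str.strip line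
  if stripped = "interface " ++ interface_name then (st.1, true)
  else if PySem.Str.startswith stripped "interface " && st.2 then (st.1 ++ [line], false)
  else if st.2 then st
  else (st.1 ++ [line], st.2)

def remove_interface_config_py (config_content : String) (interface_name : String) : String :=
  let lines := (PySem.Chars.splitOn config_content.toList ['\n']).map String.ofList  -- split('\n'), sep ≠ ""
  let res := lines.foldl (pvStepA interface_name) ([], false)
  PySem.Str.join "\n" res.1

-- ===== PORT B =====
def pvIsHeader (line : String) : Bool :=
  PySem.Str.startswith (PySem.Str.strip line) "interface "

-- one iteration of B's for-loop: state = (finished groups, current group)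
def pvStepB (st : List (List String) × List String) (line : String) :
    List (List String) × List String :=
  if pvIsHeader line then (st.1 ++ [st.2], [line])
  else (st.1, st.2 ++ [line])

-- B's keep test: not (g and g[0].strip() == header)
def pvKeep (header : String) (g : List String) : Bool :=
  !(!g.isEmpty && PySem.Str.strip (g.headD "") == header)

def remove_interface_config_py_alt (config_content : String) (interface_name : String) : String :=
  let lines := (PySem.Chars.splitOn config_content.toList ['\n']).map String.ofList  -- split('\n'), sep ≠ ""
  let st := lines.foldl pvStepB ([], [])
  let groups := st.1 ++ [st.2]
  let header := "interface " ++ interface_name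
  PySem.Str.join "\n" ((groups.filter (pvKeep header)).flatten)

-- ===== PRECONDITION & SPEC =====
def Spec_remove_interface_config_py (config_content : String) (interface_name : String) (out : String) : Prop := out = remove_interface_config_py_alt config_content interface_name
instance (config_content : String) (interface_name : String) (out : String) : Decidable (Spec_remove_interface_config_py config_content interface_name out) := by unfold Spec_remove_interface_config_py; infer_instance

-- ===== CLAIM (what is proved, stated in full; the proofs are below) =====
def Claim_equal_remove_interface_config_py : Prop := ∀ (config_content : String) (interface_name : String), Dom_remove_interface_config_py config_content interface_name → Spec_remove_interface_config_py config_content interface_name (remove_interface_config_py config_content interface_name)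

-- ===== LEMMAS AND PROOFS =====

-- the accumulator shape: folding the current group into the finished groups
theorem pv_acc (name : String) (done : List (List String)) (cur : List String) (skip : Bool)
    (hskip : skip = (!cur.isEmpty && (PySem.Str.strip (cur.headD "") == "interface " ++ name))) :
    (done.filter (pvKeep ("interface " ++ name))).flatten ++ (if skip then [] else cur)
    = (((done ++ [cur]).filter (pvKeep ("interface " ++ name))).flatten) := by
  subst hskip
  simp only [List.filter_append, List.flatten_append, List.filter_cons, List.filter_nil, pvKeep]
  cases h : (!cur.isEmpty && (PySem.Str.strip (cur.headD "") == "interface " ++ name))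
  · simp
  · simp

-- main loop invariant
theorem pv_loop (name : String) (lines : List String)
    (done : List (List String)) (cur : List String) (skip : Bool)
    (hskip : skip = (!cur.isEmpty && (PySem.Str.strip (cur.headD "") == "interface " ++ name))) :
    (lines.foldl (pvStepA name)
      (((done.filter (pvKeep ("interface " ++ name))).flatten ++ (if skip then [] else cur)), skip)).1
    = ((((lines.foldl pvStepB (done, cur)).1 ++ [(lines.foldl pvStepB (done, cur)).2]).filter
        (pvKeep ("interface " ++ name))).flatten) := by
  induction lines generalizing done cur skip with
  | nil => simpa using pv_acc name done cur skip hskip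
  | cons line rest ih =>
    simp only [List.foldl_cons]
    by_cases h1 : PySem.Str.strip line = "interface " ++ name
    · -- matching header: A sets skip, B closes the group and opens a dropped one
      have h1c : PySem.Chars.strip line.toList = ['i','n','t','e','r','f','a','c','e',' '] ++ name.toList := by
        have h := congrArg String.toList h1
        simpa [String.toList_append] using h
      have h2c : PySem.Chars.startswith (PySem.Chars.strip line.toList) ['i','n','t','e','r','f','a','c','e',' '] = true := by
        exact (PySem.Chars.startswith_iff _ _).mpr (by rw [h1c]; exact List.prefix_append _ _)
      have hB : pvStepB (done, cur) line = (done ++ [cur], [line]) := by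
        unfold pvStepB pvIsHeader
        simp [h2c]
      have hA : pvStepA name
          ((done.filter (pvKeep ("interface " ++ name))).flatten ++ (if skip then [] else cur), skip)
          line = ((done.filter (pvKeep ("interface " ++ name))).flatten ++ (if skip then [] else cur), true) := by
        unfold pvStepA
        simp [h1]
      rw [hA, hB, pv_acc name done cur skip hskip]
      have h3 := ih (done ++ [cur]) [line] true (by simp [h1])
      simpa using h3
    · by_cases h2 : PySem.Str.startswith (PySem.Str.strip line) "interface " = true
      · -- another interface header: both keep the line and start a fresh kept group
        have h2c : PySem.Chars.startswith (PySem.Chars.strip line.toList) ['i','n','t','e','r','f','a','c','e',' '] = true := by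
          simpa using h2
        have hB : pvStepB (done, cur) line = (done ++ [cur], [line]) := by
          unfold pvStepB pvIsHeader
          simp [h2c]
        have hA : pvStepA name
            ((done.filter (pvKeep ("interface " ++ name))).flatten ++ (if skip then [] else cur), skip)
            line = ((done.filter (pvKeep ("interface " ++ name))).flatten ++ (if skip then [] else cur) ++ [line], false) := by
          unfold pvStepA
          cases skip <;> simp [h1, h2c]
        rw [hA, hB]
        have h3 := ih (done ++ [cur]) [line] false (by simp [h1])
        rw [pv_acc name done cur skip hskip]
        simpa [List.append_assoc] using h3
      · -- ordinary line: A keeps or skips it, B appends it to the current group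
        have h2c : PySem.Chars.startswith (PySem.Chars.strip line.toList) ['i','n','t','e','r','f','a','c','e',' '] = false := by
          simpa using h2
        have hB : pvStepB (done, cur) line = (done, cur ++ [line]) := by
          unfold pvStepB pvIsHeader
          simp [h2c]
        rw [hB]
        cases skip with
        | true =>
          have hc : cur.isEmpty = false := by
            cases cur with
            | nil => simp at hskip
            | cons a l => rfl
          have hA : pvStepA name
              ((done.filter (pvKeep ("interface " ++ name))).flatten ++ (if true then [] else cur), true)
              line = ((done.filter (pvKeep ("interface " ++ name))).flatten ++ (if true then [] else cur), true) := by
            unfold pvStepA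
            simp [h1, h2c]
          rw [hA]
          have h3 := ih done (cur ++ [line]) true (by
            cases cur with
            | nil => simp at hc
            | cons a l => simpa using hskip)
          simpa using h3
        | false =>
          have hA : pvStepA name
              ((done.filter (pvKeep ("interface " ++ name))).flatten ++ (if false then [] else cur), false)
              line = ((done.filter (pvKeep ("interface " ++ name))).flatten ++ cur ++ [line], false) := by
            unfold pvStepA
            simp [h1, h2c]
          rw [hA]
          have h3 := ih done (cur ++ [line]) false (by
            cases cur with
            | nil => simp [beq_eq_false_iff_ne.mpr h1]
            | cons a l => simpa using hskip)
          simpa [List.append_assoc] using h3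

-- ===== VERDICT (by name: the statement is the Claim_ definition above) =====
theorem remove_interface_config_py_spec : Claim_equal_remove_interface_config_py := by
  intro config_content interface_name _
  unfold Spec_remove_interface_config_py
  unfold remove_interface_config_py remove_interface_config_py_alt
  exact congrArg (PySem.Str.join "\n")
    (pv_loop interface_name ((PySem.Chars.splitOn config_content.toList ['\n']).map String.ofList)
      [] [] false rfl)
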